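-- pv_equiv track=rewrite | github.com/NickMau01/container-security-analyzer | report/report.py | _find_rootfs_prefix
-- ===== SOURCE A (Python) =====
-- from typing import Any, Dict, List, Optional, Tuple, Iterable
--
-- def _find_rootfs_prefix(paths: List[str]) -> str:
--     if not paths:
--         return ""
--     norm_paths = [p.replace("/", "\\") for p in paths if p]
--     if not norm_paths:
--         return ""
--
--     parts_list: List[List[str]] = [p.split("\\") for p in norm_paths]
--     min_len = min(len(p) for p in parts_list)
--     common: List[str] = []
--
--     for i in range(min_len):
--         segment = parts_list[0][i]
--         if all(p[i].lower() == segment.lower() for p in parts_list[1:]):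
--             common.append(segment)
--             if segment.lower() == "rootfs":
--                 break
--         else:
--             break
--
--     if not common:
--         return ""
--     return "\\".join(common)
-- ===== SOURCE B (Python) =====
-- def _find_rootfs_prefix(paths):
--     norm = [p.replace("/", "\\") for p in paths if p]
--     if not norm:
--         return ""
--
--     def common2(xs, ys):
--         # case-insensitive common prefix of two segment lists, keeping xs's case
--         out = []
--         for x, y in zip(xs, ys):
--             if y.lower() != x.lower():
--                 break
--             out.append(x)
--         return out
--
--     # pairwise reduction: running common prefix over the paths
--     acc = norm[0].split("\\")
--     for p in norm[1:]:
--         acc = common2(acc, p.split("\\"))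
--
--     # truncate after the first 'rootfs' segment
--     out = []
--     for seg in acc:
--         out.append(seg)
--         if seg.lower() == "rootfs":
--             break
--     return "\\".join(out)
-- ===== Notes on version B (the rewrite author's own statement) =====
-- stated objective: alternative
-- what changed: A scans segment columns by index with an inner all() over every path and breaks at mismatch or rootfs in one fused loop; B instead reduces pairwise over the paths (acc = common2(acc, next path's segments)), maintaining a running case-insensitive common prefix, and then truncates at the first 'rootfs' segment in a separate pass.
import Mathlib
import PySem

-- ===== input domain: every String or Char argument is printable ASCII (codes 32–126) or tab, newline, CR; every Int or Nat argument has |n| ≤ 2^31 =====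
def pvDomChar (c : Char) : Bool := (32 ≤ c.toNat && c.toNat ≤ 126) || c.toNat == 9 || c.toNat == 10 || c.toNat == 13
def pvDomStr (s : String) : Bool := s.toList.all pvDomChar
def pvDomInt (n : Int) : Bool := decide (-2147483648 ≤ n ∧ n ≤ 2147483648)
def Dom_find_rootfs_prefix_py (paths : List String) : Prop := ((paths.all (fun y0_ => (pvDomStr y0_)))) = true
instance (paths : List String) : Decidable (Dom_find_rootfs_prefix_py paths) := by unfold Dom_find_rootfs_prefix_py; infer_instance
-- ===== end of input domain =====

-- B replaces A's indexed column scan (inner all() over every path, fused break on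
-- mismatch/rootfs) by a pairwise reduction over the paths: a running case-insensitive
-- common prefix folded with common2, then a separate truncation pass at 'rootfs'
-- (alternative decomposition, same cost).

-- p.split("\\"): sep ≠ "", exact via PySem.Str.split?
def pvSplit (p : String) : List String := (PySem.Str.split? p "\\").getD []

-- min(len(p) for p in parts_list) — Python's running-min over the lengths
def pvMinLen (parts : List (List String)) : Nat :=
  (PySem.List.min? (parts.map (fun p => p.length)) (fun x => x)).getD 0

-- ===== PORT A =====
-- A's for-i loop; indexing p[i] is in range (i < min_len), so List.getD is exact here
def pvALoop (parts : List (List String)) : Nat → Nat → List String → List String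
  | 0, _, common => common
  | fuel + 1, i, common =>
    let segment := (parts.headD []).getD i ""
    if (parts.tail).all (fun p => PySem.Str.lower (p.getD i "") == PySem.Str.lower segment) then
      if PySem.Str.lower segment == "rootfs" then common ++ [segment]
      else pvALoop parts fuel (i + 1) (common ++ [segment])
    else common

def find_rootfs_prefix_py (paths : List String) : String :=
  if paths = [] then "" else
  let norm_paths := (paths.filter (fun p => p ≠ "")).map (fun p => PySem.Str.replace p "/" "\\")
  if norm_paths = [] then "" else
  let parts_list := norm_paths.map (fun p => pvSplit p)
  let min_len := pvMinLen parts_list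
  let common := pvALoop parts_list min_len 0 []
  if common = [] then "" else PySem.Str.join "\\" common

-- ===== PORT B =====
-- common2: the zip loop with break — case-insensitive common prefix of two segment lists
def pvCommon2 : List String → List String → List String
  | [], _ => []
  | _ :: _, [] => []
  | x :: xs, y :: ys =>
    if PySem.Str.lower y != PySem.Str.lower x then [] else x :: pvCommon2 xs ys

-- the truncation pass: append each segment, stop after the first 'rootfs'
def pvTrimRootfs : List String → List String
  | [] => []
  | seg :: rest =>
    if PySem.Str.lower seg == "rootfs" then [seg] else seg :: pvTrimRootfs rest

def find_rootfs_prefix_py_alt (paths : List String) : String :=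
  let norm := (paths.filter (fun p => p ≠ "")).map (fun p => PySem.Str.replace p "/" "\\")
  match norm with
  | [] => ""
  | h :: t =>
    let acc := t.foldl (fun acc p => pvCommon2 acc (pvSplit p)) (pvSplit h)
    PySem.Str.join "\\" (pvTrimRootfs acc)

-- ===== PRECONDITION & SPEC =====
def Spec_find_rootfs_prefix_py (paths : List String) (out : String) : Prop := out = find_rootfs_prefix_py_alt paths
instance (paths : List String) (out : String) : Decidable (Spec_find_rootfs_prefix_py paths out) := by unfold Spec_find_rootfs_prefix_py; infer_instance

-- ===== CLAIM (what is proved, stated in full; the proofs are below) =====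
def Claim_equal_find_rootfs_prefix_py : Prop := ∀ (paths : List String), Dom_find_rootfs_prefix_py paths → Spec_find_rootfs_prefix_py paths (find_rootfs_prefix_py paths)

-- ===== LEMMAS AND PROOFS =====

-- the common case-insensitive prefix of a against a whole family ps
def pvCiAll : List String → List (List String) → List String
  | [], _ => []
  | x :: xs, ps =>
    if ps.all (fun p => !p.isEmpty && (PySem.Str.lower (p.headD "") == PySem.Str.lower x)) then
      x :: pvCiAll xs (ps.map List.tail)
    else []

lemma pvCiAll_nil_right (a : List String) : pvCiAll a [] = a := by
  induction a with
  | nil => rfl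
  | cons x xs ih => simp [pvCiAll, ih]

lemma pvCommon2_ciAll (a : List String) : ∀ (q : List String) (ps : List (List String)),
    pvCiAll (pvCommon2 a q) ps = pvCiAll a (q :: ps) := by
  induction a with
  | nil => intro q ps; simp [pvCommon2, pvCiAll]
  | cons x xs ih =>
    intro q ps
    cases q with
    | nil => simp [pvCommon2, pvCiAll]
    | cons y ys =>
      by_cases hxy : PySem.Str.lower y = PySem.Str.lower x
      · simp only [pvCommon2, hxy, bne_self_eq_false, Bool.false_eq_true, if_false]
        have hhead : (((y :: ys) :: ps).all
              (fun p => !p.isEmpty && (PySem.Str.lower (p.headD "") == PySem.Str.lower x)))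
            = (ps.all (fun p => !p.isEmpty && (PySem.Str.lower (p.headD "") == PySem.Str.lower x))) := by
          simp [hxy]
        simp only [pvCiAll, hhead]
        split_ifs with hps
        · rw [ih]; simp
        · rfl
      · have hb : (PySem.Str.lower y != PySem.Str.lower x) = true := by simpa using hxy
        simp [pvCommon2, hb, pvCiAll, hxy]

lemma pvFoldl_ciAll (t : List (List String)) : ∀ (a : List String),
    t.foldl pvCommon2 a = pvCiAll a t := by
  induction t with
  | nil => intro a; simp [pvCiAll_nil_right]
  | cons q t ih => intro a; simp [List.foldl, ih, pvCommon2_ciAll]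

lemma pvALoop_ciAll (h : List String) (t : List (List String)) :
    ∀ (m i : Nat) (acc : List String),
      (∀ p ∈ h :: t, i + m ≤ p.length) →
      (∃ p ∈ h :: t, p.length = i + m) →
      pvALoop (h :: t) m i acc =
        acc ++ pvTrimRootfs (pvCiAll (h.drop i) (t.map (List.drop i))) := by
  intro m
  induction m with
  | zero =>
    intro i acc hlo hex
    obtain ⟨p, hp, hlen⟩ := hex
    simp only [Nat.add_zero] at hlen
    have hnil : pvCiAll (h.drop i) (t.map (List.drop i)) = [] := by
      rcases List.mem_cons.mp hp with rfl | hpt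
      · simp [List.drop_eq_nil_of_le hlen.le, pvCiAll]
      · cases hd : h.drop i with
        | nil => simp [pvCiAll]
        | cons x xs =>
          have hpd : p.drop i = [] := List.drop_eq_nil_of_le hlen.le
          have hfalse : ((t.map (List.drop i)).all
              (fun q => !q.isEmpty && (PySem.Str.lower (q.headD "") == PySem.Str.lower x))) = false := by
            rw [List.all_eq_false]
            refine ⟨p.drop i, List.mem_map_of_mem hpt, ?_⟩
            rw [hpd]; simp
          rw [pvCiAll, hfalse]
          simp
    simp [pvALoop, hnil, pvTrimRootfs]
  | succ m ih =>
    intro i acc hlo hex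
    have hih : i < h.length := by
      have := hlo h (List.mem_cons_self)
      omega
    have hd : h.drop i = h[i] :: h.drop (i + 1) := (List.getElem_cons_drop hih).symm
    have hseg : h.getD i "" = h[i] := by
      simp [List.getD, List.getElem?_eq_getElem hih]
    have hcond : (t.all (fun p => PySem.Str.lower (p.getD i "") == PySem.Str.lower h[i]))
        = ((t.map (List.drop i)).all
            (fun q => !q.isEmpty && (PySem.Str.lower (q.headD "") == PySem.Str.lower h[i]))) := by
      rw [List.all_map, Bool.eq_iff_iff, List.all_eq_true, List.all_eq_true]
      apply forall_congr'
      intro p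
      apply imp_congr_right
      intro hp
      have hpi : i < p.length := by
        have := hlo p (List.mem_cons_of_mem _ hp); omega
      have hpd : p.drop i = p[i] :: p.drop (i + 1) := (List.getElem_cons_drop hpi).symm
      simp only [Function.comp_apply]
      rw [hpd]
      simp [List.getD_eq_getElem?_getD, List.getElem?_eq_getElem hpi]
      exact fun _ => hpi
    have htails : (t.map (List.drop i)).map List.tail = t.map (List.drop (i + 1)) := by
      rw [List.map_map]
      have hfn : (List.tail ∘ List.drop i : List String → List String) = List.drop (i + 1) :=
        funext (fun p => List.tail_drop)
      rw [hfn]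
    rw [pvALoop]
    simp only [List.tail_cons, List.headD_cons]
    rw [hseg, hcond]
    by_cases hall : ((t.map (List.drop i)).all
        (fun q => !q.isEmpty && (PySem.Str.lower (q.headD "") == PySem.Str.lower h[i]))) = true
    · rw [hall]
      simp only [if_true]
      have hci : pvCiAll (h.drop i) (t.map (List.drop i)) =
          h[i] :: pvCiAll (h.drop (i + 1)) (t.map (List.drop (i + 1))) := by
        rw [hd, pvCiAll, hall, htails]
        simp
      by_cases hroot : PySem.Str.lower h[i] = "rootfs"
      · simp [hroot, hci, pvTrimRootfs]
      · have hroot' : (PySem.Str.lower h[i] == "rootfs") = false := by simpa using hroot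
        rw [hroot']
        simp only [Bool.false_eq_true, if_false]
        rw [ih (i + 1) (acc ++ [h[i]])
          (by intro p hp; have := hlo p hp; omega)
          (by obtain ⟨p, hp, hl⟩ := hex; exact ⟨p, hp, by omega⟩)]
        simp [hci, pvTrimRootfs, hroot]
    · have hall' := Bool.eq_false_iff.mpr (fun hgoal => hall hgoal)
      rw [hall']
      simp only [Bool.false_eq_true, if_false]
      have hci : pvCiAll (h.drop i) (t.map (List.drop i)) = [] := by
        rw [hd, pvCiAll, hall']
        simp
      simp [hci, pvTrimRootfs]

lemma pvJoin_nil : PySem.Str.join "\\" ([] : List String) = "" := by decide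

-- ===== VERDICT (by name: the statement is the Claim_ definition above) =====
theorem find_rootfs_prefix_py_spec : Claim_equal_find_rootfs_prefix_py := by
  intro paths _
  unfold Spec_find_rootfs_prefix_py find_rootfs_prefix_py find_rootfs_prefix_py_alt
  by_cases hp : paths = []
  · subst hp; simp
  · rw [if_neg hp]
    rcases hn : (paths.filter (fun p => p ≠ "")).map (fun p => PySem.Str.replace p "/" "\\") with _ | ⟨h, t⟩
    · simp
    · show (if (h :: t : List String) = [] then "" else
          if pvALoop ((pvSplit h) :: t.map (fun p => pvSplit p))
              (pvMinLen ((pvSplit h) :: t.map (fun p => pvSplit p))) 0 [] = [] then ""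
          else PySem.Str.join "\\" (pvALoop ((pvSplit h) :: t.map (fun p => pvSplit p))
              (pvMinLen ((pvSplit h) :: t.map (fun p => pvSplit p))) 0 [])) =
        PySem.Str.join "\\" (pvTrimRootfs (t.foldl (fun acc p => pvCommon2 acc (pvSplit p)) (pvSplit h)))
      rw [if_neg (by simp : ¬ (h :: t : List String) = [])]
      have hmem : ∀ p ∈ (pvSplit h) :: t.map (fun p => pvSplit p),
          pvMinLen ((pvSplit h) :: t.map (fun p => pvSplit p)) ≤ p.length := by
        intro p hpmem
        cases hmq : PySem.List.min? (((pvSplit h) :: t.map (fun p => pvSplit p)).map (fun p => p.length)) (fun x => x) with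
        | none =>
          have := (PySem.List.min?_eq_none_iff
            (xs := ((pvSplit h) :: t.map (fun p => pvSplit p)).map (fun p => p.length)) (key := fun x => x)).mp hmq
          simp at this
        | some m =>
          have hle := PySem.List.min?_isMin hmq (p.length) (List.mem_map_of_mem hpmem)
          have hpm : pvMinLen ((pvSplit h) :: t.map (fun p => pvSplit p)) = m := by
            unfold pvMinLen; rw [hmq]; rfl
          rw [hpm]
          simpa using hle
      have hex : ∃ p ∈ (pvSplit h) :: t.map (fun p => pvSplit p),
          p.length = 0 + pvMinLen ((pvSplit h) :: t.map (fun p => pvSplit p)) := by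
        cases hmq : PySem.List.min? (((pvSplit h) :: t.map (fun p => pvSplit p)).map (fun p => p.length)) (fun x => x) with
        | none =>
          have := (PySem.List.min?_eq_none_iff
            (xs := ((pvSplit h) :: t.map (fun p => pvSplit p)).map (fun p => p.length)) (key := fun x => x)).mp hmq
          simp at this
        | some m =>
          have hm := PySem.List.min?_mem hmq
          obtain ⟨p, hpmem, hpl⟩ := List.mem_map.mp hm
          have hpm : pvMinLen ((pvSplit h) :: t.map (fun p => pvSplit p)) = m := by
            unfold pvMinLen; rw [hmq]; rfl
          exact ⟨p, hpmem, by rw [Nat.zero_add, hpm]; exact hpl⟩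
      have hloop := pvALoop_ciAll (pvSplit h) (t.map (fun p => pvSplit p))
        (pvMinLen ((pvSplit h) :: t.map (fun p => pvSplit p))) 0 []
        (by intro p hpm2; have := hmem p hpm2; omega) hex
      simp only [List.drop_zero] at hloop
      have hdrop0 : (t.map (fun p => pvSplit p)).map (List.drop 0) = t.map (fun p => pvSplit p) := by
        simp
      rw [hdrop0] at hloop
      rw [hloop]
      have hfold : t.foldl (fun acc p => pvCommon2 acc (pvSplit p)) (pvSplit h) =
          pvCiAll (pvSplit h) (t.map (fun p => pvSplit p)) := by
        rw [← pvFoldl_ciAll]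
        rw [List.foldl_map]
      rw [hfold]
      simp only [List.nil_append]
      by_cases hc : pvTrimRootfs (pvCiAll (pvSplit h) (t.map (fun p => pvSplit p))) = []
      · simp [hc, pvJoin_nil]
      · rw [if_neg hc]
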